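-- pv_equiv track=rewrite | github.com/misterfitz/slurm-docker-cluster | playground/cli/slurm_playground/simulate.py | _compress_node_range
-- ===== SOURCE A (Python) =====
-- def _compress_node_range(names: list[str]) -> str:
--     """Compress ['c1','c2','c3'] into 'c[1-3]'."""
--     # Group by prefix
--     prefixes: dict[str, list[int]] = {}
--     for name in sorted(names):
--         prefix = name.rstrip("0123456789")
--         num = name[len(prefix):]
--         if num.isdigit():
--             prefixes.setdefault(prefix, []).append(int(num))
--         else:
--             prefixes.setdefault(name, [])
--
--     parts = []
--     for prefix, nums in sorted(prefixes.items()):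
--         if not nums:
--             parts.append(prefix)
--         elif len(nums) == 1:
--             parts.append(f"{prefix}{nums[0]}")
--         else:
--             nums.sort()
--             parts.append(f"{prefix}[{nums[0]}-{nums[-1]}]")
--
--     return ",".join(parts)
-- ===== SOURCE B (Python) =====
-- def _compress_node_range(names: list[str]) -> str:
--     """Compress ['c1','c2','c3'] into 'c[1-3]'."""
--     # Sort-and-scan: tag each name as a (prefix, number) pair (-1 marks a bare
--     # name, numbers are never negative), sort the pairs lexicographically once,
--     # then emit one part per run of equal prefixes; no dict and no per-group
--     # re-sort are needed, because within a run the numbers already ascend.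
--     pairs = []
--     for name in names:
--         prefix = name.rstrip("0123456789")
--         tail = name[len(prefix):]
--         pairs.append((prefix, int(tail)) if tail else (prefix, -1))
--     pairs.sort()
--     parts = []
--     i = 0
--     while i < len(pairs):
--         key = pairs[i][0]
--         j = i
--         while j < len(pairs) and pairs[j][0] == key:
--             j += 1
--         nums = [v for _, v in pairs[i:j] if v >= 0]
--         if not nums:
--             parts.append(key)
--         elif len(nums) == 1:
--             parts.append(f"{key}{nums[0]}")
--         else:
--             parts.append(f"{key}[{nums[0]}-{nums[-1]}]")
--         i = j
--     return ",".join(parts)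
-- ===== Notes on version B (the rewrite author's own statement) =====
-- stated objective: alternative
-- what changed: A groups names into a dict of per-prefix suffix lists and re-sorts each list while formatting; B never builds a dict: it tags each name as a (prefix, number) pair (-1 for bare names), sorts the pair list lexicographically once, and emits one part per run of equal prefixes in a single scan, the run's numbers already being in ascending order.
import Mathlib
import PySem

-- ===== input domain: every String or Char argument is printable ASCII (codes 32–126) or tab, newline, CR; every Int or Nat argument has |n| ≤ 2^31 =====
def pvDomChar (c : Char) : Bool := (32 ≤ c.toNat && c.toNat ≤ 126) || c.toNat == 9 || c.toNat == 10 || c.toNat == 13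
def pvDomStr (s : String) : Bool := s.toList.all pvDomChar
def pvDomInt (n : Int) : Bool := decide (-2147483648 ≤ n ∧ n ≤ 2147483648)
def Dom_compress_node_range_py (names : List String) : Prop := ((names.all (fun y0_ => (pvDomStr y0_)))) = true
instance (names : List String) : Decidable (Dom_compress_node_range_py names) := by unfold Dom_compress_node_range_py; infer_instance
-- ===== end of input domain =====

-- B replaces A's dict of per-prefix suffix lists (each re-sorted while formatting) by one
-- lexicographic sort of (prefix, number) pairs followed by a single run-detecting scan.

-- shared helper: name.rstrip("0123456789") (hand port, exact: drops trailing ASCII digits)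
def pvRstripDigits (cs : List Char) : List Char :=
  (cs.reverse.dropWhile PySem.Chars.isdigit).reverse

-- ===== PORT A =====
-- loop body: prefix = name.rstrip(digits); num = name[len(prefix):];
-- setdefault(prefix, []).append(int(num)) is Dict.modify with append
def pvA_step (d : PySem.Dict String (List Int)) (name : String) : PySem.Dict String (List Int) :=
  let pfx := pvRstripDigits name.toList
  let pre := String.ofList pfx
  let num := PySem.Chars.slice name.toList (some (pfx.length : Int)) none
  if PySem.Chars.strIsdigit num then
    -- int(num): num is all digits here, so ValueError is unreachable
    d.modify pre [] (fun l => l ++ [(PySem.Int.ofChars? num).getD 0])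
  else
    d.setdefault name []

def compress_node_range_py (names : List String) : String :=
  let prefixes := (PySem.List.sorted names (fun x => x) false).foldl pvA_step PySem.Dict.empty
  -- sorted(prefixes.items()): dict keys are unique, so Python's tuple comparison is decided by the key
  let parts := (PySem.List.sorted prefixes.items (fun p => p.1) false).foldl
    (fun parts p =>
      if p.2 = [] then parts ++ [p.1]
      else if p.2.length = 1 then
        parts ++ [p.1 ++ PySem.Int.toStr ((PySem.List.pyGet? p.2 0).getD 0)]
      else
        let s := PySem.List.sorted p.2 (fun x => x) false
        parts ++ [p.1 ++ "[" ++ PySem.Int.toStr ((PySem.List.pyGet? s 0).getD 0) ++ "-" ++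
                  PySem.Int.toStr ((PySem.List.pyGet? s (-1)).getD 0) ++ "]"]) []
  PySem.Str.join "," parts

-- ===== PORT B =====
-- loop body: (prefix, int(tail)) if tail else (prefix, -1)
def pvB_pair (name : String) : String × Int :=
  let pfx := pvRstripDigits name.toList
  let tail := PySem.Chars.slice name.toList (some (pfx.length : Int)) none
  if tail.isEmpty then (String.ofList pfx, -1)
  -- int(tail): tail is all digits here, so ValueError is unreachable
  else (String.ofList pfx, (PySem.Int.ofChars? tail).getD 0)

-- one part of the output: the if/elif/else over nums = [v for _, v in pairs[i:j] if v >= 0]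
def pvFmt (k : String) (nums : List Int) : String :=
  if nums = [] then k
  else if nums.length = 1 then k ++ PySem.Int.toStr ((PySem.List.pyGet? nums 0).getD 0)
  else k ++ "[" ++ PySem.Int.toStr ((PySem.List.pyGet? nums 0).getD 0) ++ "-" ++
       PySem.Int.toStr ((PySem.List.pyGet? nums (-1)).getD 0) ++ "]"

-- the outer while loop: each iteration consumes one run pairs[i:j] of equal prefixes
def pvB_scan : List (String × Int) → List String
  | [] => []
  | (k, v) :: rest =>
    let run := rest.takeWhile (fun p => p.1 == k)
    let nums := ((k, v) :: run).filterMap (fun p => if 0 ≤ p.2 then some p.2 else none)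
    pvFmt k nums :: pvB_scan (rest.dropWhile (fun p => p.1 == k))
termination_by S => S.length
decreasing_by
  simp only [List.length_cons]
  have := List.length_dropWhile_le (fun p => p.1 == k) rest
  omega

def compress_node_range_py_alt (names : List String) : String :=
  -- pairs.sort(): Python compares the tuples lexicographically
  let pairs := PySem.List.sorted2 (names.map pvB_pair) (fun p => p.1) (fun p => p.2) false
  PySem.Str.join "," (pvB_scan pairs)

-- ===== PRECONDITION & SPEC =====
def Spec_compress_node_range_py (names : List String) (out : String) : Prop := out = compress_node_range_py_alt names
instance (names : List String) (out : String) : Decidable (Spec_compress_node_range_py names out) := by unfold Spec_compress_node_range_py; infer_instance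

-- ===== CLAIM (what is proved, stated in full; the proofs are below) =====
def Claim_equal_compress_node_range_py : Prop := ∀ (names : List String), Dom_compress_node_range_py names → Spec_compress_node_range_py names (compress_node_range_py names)

-- ===== LEMMAS AND PROOFS =====

-- the numeric suffixes (in order) that the pair list ps contributes to prefix k
def pvNums (ps : List (String × Int)) (k : String) : List Int :=
  (ps.filter (fun p => p.1 == k)).filterMap (fun p => if 0 ≤ p.2 then some p.2 else none)

-- A's dict contents as a function of the processed pair list
def pvG (ps : List (String × Int)) : List (String × List Int) :=
  (PySem.List.dedup (ps.map Prod.fst)).map (fun k => (k, pvNums ps k))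

-- ---- parse facts ----

theorem pv_isdigit_not_space (c : Char) (h : PySem.Chars.isdigit c = true) :
    PySem.Int.isIntSpace c = false := by
  simp only [PySem.Chars.isdigit, Bool.and_eq_true, decide_eq_true_eq] at h
  obtain ⟨h1, h2⟩ := h
  simp only [PySem.Int.isIntSpace, Bool.or_eq_false_iff, decide_eq_false_iff_not]
  refine ⟨⟨⟨⟨⟨?_, ?_⟩, ?_⟩, ?_⟩, ?_⟩, ?_⟩ <;> (rintro rfl; revert h1; decide)

theorem pv_split (cs : List Char) :
    cs = pvRstripDigits cs ++ (cs.reverse.takeWhile PySem.Chars.isdigit).reverse := by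
  unfold pvRstripDigits
  rw [← List.reverse_append, List.takeWhile_append_dropWhile, List.reverse_reverse]

theorem pv_tail_eq (cs : List Char) :
    PySem.Chars.slice cs (some ((pvRstripDigits cs).length : Int)) none
      = (cs.reverse.takeWhile PySem.Chars.isdigit).reverse := by
  rw [PySem.Chars.slice_eq_listSlice, PySem.List.slice_from_natCast]
  nth_rewrite 2 [pv_split cs]
  exact List.drop_left

theorem pv_tail_digits (cs : List Char) :
    ∀ c ∈ (cs.reverse.takeWhile PySem.Chars.isdigit).reverse, PySem.Chars.isdigit c = true := by
  intro c hc
  rw [List.mem_reverse] at hc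
  exact List.mem_takeWhile_imp hc

theorem pv_ofChars_nonneg (cs : List Char) (hne : cs ≠ [])
    (h : ∀ c ∈ cs, PySem.Chars.isdigit c = true) :
    0 ≤ (PySem.Int.ofChars? cs).getD 0 := by
  have hds : cs.dropWhile PySem.Int.isIntSpace = cs := by
    apply List.dropWhile_eq_self_iff.mpr
    cases cs with
    | nil => simp
    | cons a t => simpa using pv_isdigit_not_space a (h a (by simp))
  have hds2 : cs.reverse.dropWhile PySem.Int.isIntSpace = cs.reverse := by
    apply List.dropWhile_eq_self_iff.mpr
    cases hr : cs.reverse with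
    | nil => simp
    | cons a t =>
        have : a ∈ cs := by rw [← List.mem_reverse, hr]; simp
        simpa using pv_isdigit_not_space a (h a this)
  unfold PySem.Int.ofChars?
  rw [hds, hds2, List.reverse_reverse]
  cases hc : cs with
  | nil => exact absurd hc hne
  | cons a t =>
      have ha : PySem.Chars.isdigit a = true := h a (by rw [hc]; simp)
      have hm : a ≠ '-' := by rintro rfl; revert ha; decide
      have hp : a ≠ '+' := by rintro rfl; revert ha; decide
      dsimp only
      split
      · next heq => rw [List.cons.injEq] at heq; exact (hm heq.1).elim
      · next heq => rw [List.cons.injEq] at heq; exact (hp heq.1).elim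
      · have key : ∀ (o : Option Nat),
            0 ≤ (Option.map (fun n => n) (o.bind (fun a => pure ((a : Int))))).getD 0 := by
          intro o; cases o <;> simp
        exact key _

-- the two loop bodies act on the same parsed pair
theorem pvA_step_cases (d : PySem.Dict String (List Int)) (name : String) :
    pvA_step d name =
      if 0 ≤ (pvB_pair name).2
      then d.insert (pvB_pair name).1 ((d.getD (pvB_pair name).1 []) ++ [(pvB_pair name).2])
      else d.setdefault (pvB_pair name).1 [] := by
  unfold pvA_step pvB_pair
  dsimp only
  simp only [pv_tail_eq]
  by_cases he : (name.toList.reverse.takeWhile PySem.Chars.isdigit).reverse = []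
  · have hpfx : pvRstripDigits name.toList = name.toList := by
      have := pv_split name.toList
      rw [he, List.append_nil] at this
      exact this.symm
    simp only [he, PySem.Chars.strIsdigit, List.isEmpty_nil, Bool.not_true, Bool.false_and,
      Bool.false_eq_true, if_false, if_true]
    rw [if_neg (by norm_num)]
    rw [hpfx, String.ofList_toList]
  · have hdig := pv_tail_digits name.toList
    have he' : ((name.toList.reverse.takeWhile PySem.Chars.isdigit).reverse).isEmpty = false := by
      simpa [List.isEmpty_iff] using he
    have hsd : PySem.Chars.strIsdigit ((name.toList.reverse.takeWhile PySem.Chars.isdigit).reverse) = true := by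
      simp only [PySem.Chars.strIsdigit, Bool.and_eq_true, Bool.not_eq_eq_eq_not, List.all_eq_true]
      exact ⟨he', hdig⟩
    have hnn := pv_ofChars_nonneg _ he hdig
    simp only [hsd, if_true, he', Bool.false_eq_true, if_false]
    rw [if_pos hnn]
    rfl

-- ---- A side: the fold builds pvG ----

theorem pv_pvG_map_fst (Q : List (String × Int)) :
    (pvG Q).map Prod.fst = PySem.List.dedup (Q.map Prod.fst) := by
  simp [pvG, List.map_map, Function.comp_def]

theorem pv_contains_pvG (Q : List (String × Int)) (k : String) :
    (PySem.Dict.mk (pvG Q)).contains k = decide (k ∈ Q.map Prod.fst) := by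
  by_cases h : k ∈ Q.map Prod.fst <;>
    simp only [PySem.Dict.contains, pvG, List.any_map, Function.comp_def, List.any_eq_true,
      PySem.List.mem_dedup, beq_iff_eq, h, decide_true, decide_false]
  · exact ⟨k, h, rfl⟩
  · simp only [List.any_eq_false, beq_iff_eq]
    intro x hx
    rw [PySem.List.mem_dedup] at hx
    exact fun hxk => h (hxk ▸ hx)

theorem pv_get?_pvG (Q : List (String × Int)) (k : String) (hk : k ∈ Q.map Prod.fst) :
    (PySem.Dict.mk (pvG Q)).get? k = some (pvNums Q k) := by
  apply PySem.Dict.get?_of_mem_items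
  · exact List.mem_map.mpr ⟨k, by rw [PySem.List.mem_dedup]; exact hk, rfl⟩
  · show ((PySem.Dict.mk (pvG Q)).items.map Prod.fst).Nodup
    show ((pvG Q).map Prod.fst).Nodup
    rw [pv_pvG_map_fst, PySem.List.dedup_eq_ofList]
    exact PySem.Set.nodup_ofList _

theorem pv_nums_append (Q : List (String × Int)) (p : String × Int) (k : String) :
    pvNums (Q ++ [p]) k
      = pvNums Q k ++ (if p.1 = k then (if 0 ≤ p.2 then [p.2] else []) else []) := by
  simp only [pvNums, List.filter_append, List.filterMap_append]
  congr 1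
  by_cases h1 : p.1 = k <;> by_cases h2 : 0 ≤ p.2 <;> simp [h1, h2]

theorem pv_nums_nil_of_not_mem (Q : List (String × Int)) (k : String)
    (hk : k ∉ Q.map Prod.fst) : pvNums Q k = [] := by
  have : Q.filter (fun p => p.1 == k) = [] := by
    rw [List.filter_eq_nil_iff]
    intro p hp
    simp only [beq_iff_eq]
    exact fun h => hk (List.mem_map.mpr ⟨p, hp, h⟩)
  simp [pvNums, this]

theorem pv_dedup_append (l : List String) (x : String) :
    PySem.List.dedup (l ++ [x])
      = if x ∈ l then PySem.List.dedup l else PySem.List.dedup l ++ [x] := by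
  rw [PySem.List.dedup_eq_ofList, PySem.List.dedup_eq_ofList, PySem.Set.ofList_append_singleton]
  unfold PySem.Set.add PySem.Set.contains
  by_cases h : x ∈ l <;>
    simp [PySem.Set.mem_ofList, h]

theorem pvA_step_pvG (Q : List (String × Int)) (name : String) :
    pvA_step (PySem.Dict.mk (pvG Q)) name = PySem.Dict.mk (pvG (Q ++ [pvB_pair name])) := by
  rw [pvA_step_cases]
  set p := pvB_pair name with hp
  have hmapfst : (Q ++ [p]).map Prod.fst = Q.map Prod.fst ++ [p.1] := by simp
  by_cases hv : 0 ≤ p.2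
  · rw [if_pos hv]
    by_cases hk : p.1 ∈ Q.map Prod.fst
    · -- key already present: in-place update of its entry
      have hc : (PySem.Dict.mk (pvG Q)).contains p.1 = true := by
        rw [pv_contains_pvG]; exact decide_eq_true hk
      have hgd : (PySem.Dict.mk (pvG Q)).getD p.1 [] = pvNums Q p.1 :=
        PySem.Dict.getD_of_get?_eq_some _ _ (pv_get?_pvG Q p.1 hk)
      apply PySem.Dict.ext
      rw [PySem.Dict.items_insert_of_contains _ _ hc, hgd]
      show (pvG Q).map _ = pvG (Q ++ [p])
      simp only [pvG]
      rw [hmapfst, pv_dedup_append, if_pos hk, List.map_map]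
      refine List.map_congr_left (fun k' hk' => ?_)
      rw [Function.comp_apply]
      by_cases he : k' = p.1
      · subst he
        rw [if_pos (by simp), pv_nums_append, if_pos rfl, if_pos hv]
      · rw [if_neg (by simpa using he), pv_nums_append,
          if_neg (fun h => he h.symm), List.append_nil]
    · -- new key: appended at the end
      have hc : (PySem.Dict.mk (pvG Q)).contains p.1 = false := by
        rw [pv_contains_pvG]; exact decide_eq_false hk
      have hg : (PySem.Dict.mk (pvG Q)).getD p.1 [] = [] :=
        PySem.Dict.getD_of_not_contains _ _ hc
      apply PySem.Dict.ext
      rw [PySem.Dict.items_insert_of_not_contains _ _ hc, hg]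
      show pvG Q ++ [(p.1, [] ++ [p.2])] = pvG (Q ++ [p])
      simp only [pvG, List.nil_append]
      rw [hmapfst, pv_dedup_append, if_neg hk, List.map_append]
      congr 1
      · refine List.map_congr_left (fun k' hk' => ?_)
        have he : k' ≠ p.1 := by
          rintro rfl; exact hk (by rwa [← PySem.List.mem_dedup])
        rw [pv_nums_append, if_neg (fun h => he h.symm), List.append_nil]
      · simp only [List.map_cons, List.map_nil]
        rw [pv_nums_append, if_pos rfl, if_pos hv, pv_nums_nil_of_not_mem Q p.1 hk]
        simp
  · -- bare name: setdefault
    rw [if_neg hv]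
    by_cases hk : p.1 ∈ Q.map Prod.fst
    · have hc : (PySem.Dict.mk (pvG Q)).contains p.1 = true := by
        rw [pv_contains_pvG]; exact decide_eq_true hk
      rw [PySem.Dict.setdefault_of_contains _ _ hc]
      apply PySem.Dict.ext
      show pvG Q = pvG (Q ++ [p])
      simp only [pvG]
      rw [hmapfst, pv_dedup_append, if_pos hk]
      refine List.map_congr_left (fun k' hk' => ?_)
      rw [pv_nums_append]
      by_cases he : p.1 = k'
      · rw [if_pos he, if_neg hv, List.append_nil]
      · rw [if_neg he, List.append_nil]
    · have hc : (PySem.Dict.mk (pvG Q)).contains p.1 = false := by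
        rw [pv_contains_pvG]; exact decide_eq_false hk
      rw [PySem.Dict.setdefault_of_not_contains _ _ hc]
      apply PySem.Dict.ext
      rw [PySem.Dict.items_insert_of_not_contains _ _ hc]
      show pvG Q ++ [(p.1, [])] = pvG (Q ++ [p])
      simp only [pvG]
      rw [hmapfst, pv_dedup_append, if_neg hk, List.map_append]
      congr 1
      · refine List.map_congr_left (fun k' hk' => ?_)
        have he : k' ≠ p.1 := by
          rintro rfl; exact hk (by rwa [← PySem.List.mem_dedup])
        rw [pv_nums_append, if_neg (fun h => he h.symm), List.append_nil]
      · simp only [List.map_cons, List.map_nil]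
        rw [pv_nums_append, if_pos rfl, if_neg hv, pv_nums_nil_of_not_mem Q p.1 hk]
        simp

theorem pvA_fold (L : List String) (Q : List (String × Int)) :
    L.foldl pvA_step (PySem.Dict.mk (pvG Q)) = PySem.Dict.mk (pvG (Q ++ L.map pvB_pair)) := by
  induction L generalizing Q with
  | nil => simp
  | cons x t ih =>
      rw [List.foldl_cons, pvA_step_pvG, ih]
      simp

-- ---- A side: the output pass ----

def pvFmtA (p : String × List Int) : String :=
  if p.2 = [] then p.1
  else if p.2.length = 1 then p.1 ++ PySem.Int.toStr ((PySem.List.pyGet? p.2 0).getD 0)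
  else p.1 ++ "[" ++ PySem.Int.toStr ((PySem.List.pyGet? (PySem.List.sorted p.2 (fun x => x) false) 0).getD 0) ++ "-" ++
       PySem.Int.toStr ((PySem.List.pyGet? (PySem.List.sorted p.2 (fun x => x) false) (-1)).getD 0) ++ "]"

theorem pv_foldA (l : List (String × List Int)) :
    l.foldl (fun parts p =>
      if p.2 = [] then parts ++ [p.1]
      else if p.2.length = 1 then
        parts ++ [p.1 ++ PySem.Int.toStr ((PySem.List.pyGet? p.2 0).getD 0)]
      else
        parts ++ [p.1 ++ "[" ++ PySem.Int.toStr ((PySem.List.pyGet? (PySem.List.sorted p.2 (fun x => x) false) 0).getD 0) ++ "-" ++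
                  PySem.Int.toStr ((PySem.List.pyGet? (PySem.List.sorted p.2 (fun x => x) false) (-1)).getD 0) ++ "]"]) []
      = l.map pvFmtA := by
  have h : (fun (parts : List String) (p : String × List Int) =>
      if p.2 = [] then parts ++ [p.1]
      else if p.2.length = 1 then
        parts ++ [p.1 ++ PySem.Int.toStr ((PySem.List.pyGet? p.2 0).getD 0)]
      else
        parts ++ [p.1 ++ "[" ++ PySem.Int.toStr ((PySem.List.pyGet? (PySem.List.sorted p.2 (fun x => x) false) 0).getD 0) ++ "-" ++
                  PySem.Int.toStr ((PySem.List.pyGet? (PySem.List.sorted p.2 (fun x => x) false) (-1)).getD 0) ++ "]"])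
      = fun parts p => parts ++ [pvFmtA p] := by
    funext parts p
    unfold pvFmtA
    split_ifs <;> rfl
  rw [h, PySem.List.foldl_append_singleton_eq_map]
  simp

theorem pv_map_insertBy {α β : Type} (f : α → β) (b : α → α → Bool) (b' : β → β → Bool)
    (hb : ∀ x y, b x y = b' (f x) (f y)) (x : α) (ys : List α) :
    (PySem.List.insertBy b x ys).map f = PySem.List.insertBy b' (f x) (ys.map f) := by
  induction ys with
  | nil => simp [PySem.List.insertBy]
  | cons y t ih =>
      simp only [PySem.List.insertBy, List.map_cons, hb]
      split_ifs <;> simp [ih]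

theorem pv_sorted_map_fst (g : String → String × List Int) (hg : ∀ k, (g k).1 = k)
    (K : List String) :
    PySem.List.sorted (K.map g) (fun p => p.1) false
      = (PySem.List.sorted K (fun x => x) false).map g := by
  rw [PySem.List.sorted_eq_foldl_insertBy, PySem.List.sorted_eq_foldl_insertBy]
  suffices h : ∀ (l : List String) (a : List String),
      ((l.foldl (fun acc x => PySem.List.insertBy (fun p q => decide (p < q)) x acc) a).map g)
        = (l.map g).foldl (fun acc x => PySem.List.insertBy (fun p q => decide (p.1 < q.1)) x acc) (a.map g) by
    simpa using (h K []).symm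
  intro l
  induction l with
  | nil => intro a; simp
  | cons x t ih =>
      intro a
      simp only [List.map_cons, List.foldl_cons, ih,
        pv_map_insertBy g (fun p q => decide (p < q)) (fun p q => decide (p.1 < q.1))
          (fun a b => by simp [hg])]

theorem pv_fmtA_eq (k : String) (l : List Int) :
    pvFmtA (k, l) = pvFmt k (PySem.List.sorted l (fun x => x) false) := by
  unfold pvFmtA pvFmt
  rcases l with _ | ⟨a, _ | ⟨b, t⟩⟩
  · rfl
  · rfl
  · have hne : PySem.List.sorted (a :: b :: t) (fun x => x) false ≠ [] := by
      rw [Ne, PySem.List.sorted_eq_nil_iff]; simp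
    have hlen : (PySem.List.sorted (a :: b :: t) (fun x => x) false).length = t.length + 2 := by
      rw [PySem.List.length_sorted]; simp
    rw [if_neg (by simp), if_neg (by simp), if_neg hne, if_neg (by rw [hlen]; omega)]

-- ---- B side: sorted2 is a lexicographic sort ----

theorem pv_sorted2_eq_lex (xs : List (String × Int)) :
    PySem.List.sorted2 xs (fun p => p.1) (fun p => p.2) false
      = PySem.List.sorted xs (fun p => (toLex p : Lex (String × Int))) false := by
  have hcmp : (fun (a b : String × Int) =>
      decide (a.1 < b.1) || (!decide (b.1 < a.1) && decide (a.2 < b.2)))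
      = (fun (a b : String × Int) => decide ((toLex a : Lex (String × Int)) < toLex b)) := by
    funext a b
    rcases lt_trichotomy a.1 b.1 with h | h | h
    · simp [Prod.Lex.lt_iff, h]
    · simp [Prod.Lex.lt_iff, h]
    · simp [Prod.Lex.lt_iff, asymm h, h, (ne_of_gt h : a.1 ≠ b.1)]
  rw [PySem.List.sorted_eq_foldl_insertBy]
  unfold PySem.List.sorted2
  dsimp only
  simp only [Bool.false_eq_true, if_false]
  rw [hcmp]

-- ---- B side: the scan over a sorted pair list ----

theorem pv_dedup_head (k : String) (l1 l2 : List String)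
    (h1 : ∀ a ∈ l1, a = k) (h2 : ∀ a ∈ l2, a ≠ k) :
    PySem.List.dedup (k :: (l1 ++ l2)) = k :: PySem.List.dedup l2 := by
  induction l1 with
  | nil =>
      simp only [List.nil_append]
      rw [PySem.List.dedup_eq_ofList, PySem.List.dedup_eq_ofList, PySem.Set.ofList_cons]
      congr 1
      show List.filter _ _ = _
      refine List.filter_eq_self.mpr (fun a ha => ?_)
      have : a ∈ l2 := (PySem.Set.mem_ofList l2 a).mp ha
      simpa using h2 a this
  | cons b t ih =>
      have hb : b = k := h1 b (by simp)
      subst hb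
      have ih' := ih (fun a ha => h1 a (by simp [ha]))
      rw [PySem.List.dedup_eq_ofList] at ih' ⊢
      rw [PySem.Set.ofList_cons] at ih' ⊢
      rw [List.cons_append, PySem.Set.ofList_cons]
      rw [← ih']
      congr 1
      show List.filter _ (b :: List.filter _ _) = List.filter _ _
      rw [List.filter_cons_of_neg (by simp), List.filter_filter]
      congr 1
      funext a
      simp

theorem pv_dropWhile_head_false {α : Type} (p : α → Bool) (l : List α) (q : α) (qs : List α)
    (h : l.dropWhile p = q :: qs) : p q = false := by
  have h2 := List.head_dropWhile_not p (l := l) (by simp [h])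
  simpa only [h, List.head_cons] using h2

theorem pv_scan_eq (S : List (String × Int))
    (hpw : S.Pairwise (fun a b => (toLex a : Lex (String × Int)) ≤ toLex b)) :
    pvB_scan S = (PySem.List.dedup (S.map Prod.fst)).map (fun k => pvFmt k (pvNums S k)) := by
  induction S using pvB_scan.induct with
  | case1 => simp [pvB_scan, PySem.List.dedup, PySem.Set.ofList]
  | case2 k v rest ih =>
      have hrest : rest.Pairwise (fun a b => (toLex a : Lex (String × Int)) ≤ toLex b) :=
        hpw.of_cons
      have hkle : ∀ p ∈ rest, k ≤ p.1 := by
        intro p hp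
        rcases Prod.Lex.le_iff.mp (List.rel_of_pairwise_cons hpw hp) with h | h
        · exact le_of_lt h
        · exact le_of_eq h.1
      have hsplit : rest.takeWhile (fun p => p.1 == k) ++ rest.dropWhile (fun p => p.1 == k) = rest :=
        List.takeWhile_append_dropWhile
      have hrun : ∀ p ∈ rest.takeWhile (fun p => p.1 == k), p.1 = k := by
        intro p hp
        simpa using List.mem_takeWhile_imp hp
      have hdrop_ne : ∀ p ∈ rest.dropWhile (fun p => p.1 == k), p.1 ≠ k := by
        cases hd : rest.dropWhile (fun p => p.1 == k) with
        | nil => simp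
        | cons q qs =>
            have hq : q.1 ≠ k := by
              simpa using pv_dropWhile_head_false (fun p => p.1 == k) rest q qs hd
            have hqmem : q ∈ rest := (List.dropWhile_sublist _).subset (by rw [hd]; simp)
            have hqk : k < q.1 := lt_of_le_of_ne (hkle q hqmem) (Ne.symm hq)
            have hdrop_pw := List.Pairwise.sublist (List.dropWhile_sublist (fun p => p.1 == k)) hrest
            rw [hd] at hdrop_pw
            intro p hp
            rcases List.mem_cons.mp hp with rfl | hp'
            · exact hq
            · have hle : q.1 ≤ p.1 := by
                rcases Prod.Lex.le_iff.mp (List.rel_of_pairwise_cons hdrop_pw hp') with h | h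
                · exact le_of_lt h
                · exact le_of_eq h.1
              exact fun hc => lt_irrefl k (lt_of_lt_of_le hqk (hc ▸ hle))
      rw [pvB_scan]
      have hmap : (((k, v) :: rest).map Prod.fst)
          = k :: ((rest.takeWhile (fun p => p.1 == k)).map Prod.fst
                  ++ (rest.dropWhile (fun p => p.1 == k)).map Prod.fst) := by
        rw [List.map_cons, ← List.map_append, hsplit]
      rw [hmap, pv_dedup_head k _ _
        (by intro a ha; obtain ⟨p, hp, rfl⟩ := List.mem_map.mp ha; exact hrun p hp)
        (by intro a ha; obtain ⟨p, hp, rfl⟩ := List.mem_map.mp ha; exact hdrop_ne p hp)]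
      rw [List.map_cons]
      congr 1
      · -- the emitted part is pvFmt of the whole list's nums for k
        congr 1
        unfold pvNums
        have hfr : rest.filter (fun p => p.1 == k) = rest.takeWhile (fun p => p.1 == k) := by
          conv_lhs => rw [← hsplit]
          rw [List.filter_append,
            List.filter_eq_self.mpr (fun p hp => by simp [hrun p hp]),
            List.filter_eq_nil_iff.mpr (fun p hp => by simp [hdrop_ne p hp]),
            List.append_nil]
        rw [List.filter_cons_of_pos (by simp), hfr]
      · rw [ih (List.Pairwise.sublist (List.dropWhile_sublist _) hrest)]
        refine List.map_congr_left (fun k' hk' => ?_)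
        have hk'ne : k' ≠ k := by
          rw [PySem.List.mem_dedup] at hk'
          obtain ⟨p, hp, rfl⟩ := List.mem_map.mp hk'
          exact hdrop_ne p hp
        congr 1
        unfold pvNums
        have hfe : ((k, v) :: rest).filter (fun p => p.1 == k')
            = (rest.dropWhile (fun p => p.1 == k)).filter (fun p => p.1 == k') := by
          rw [List.filter_cons_of_neg (by simp [Ne.symm hk'ne])]
          conv_lhs => rw [← hsplit]
          rw [List.filter_append,
            List.filter_eq_nil_iff.mpr (fun p hp => by simp [hrun p hp, hk'ne.symm]),
            List.nil_append]
        rw [hfe]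

-- ---- bridging ----

theorem pv_dedup_perm (X Y : List String) (h : X.Perm Y) :
    (PySem.List.dedup X).Perm (PySem.List.dedup Y) := by
  have n1 : (PySem.List.dedup X).Nodup := by
    rw [PySem.List.dedup_eq_ofList]; exact PySem.Set.nodup_ofList X
  have n2 : (PySem.List.dedup Y).Nodup := by
    rw [PySem.List.dedup_eq_ofList]; exact PySem.Set.nodup_ofList Y
  rw [List.perm_ext_iff_of_nodup n1 n2]
  intro a
  rw [PySem.List.mem_dedup, PySem.List.mem_dedup]
  exact h.mem_iff

theorem pv_dedup_pairwise_lt (l : List String) (h : l.Pairwise (· ≤ ·)) :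
    (PySem.List.dedup l).Pairwise (· < ·) := by
  induction l with
  | nil => exact List.Pairwise.nil
  | cons x t ih =>
      rw [PySem.List.dedup_eq_ofList, PySem.Set.ofList_cons]
      refine List.pairwise_cons.mpr ⟨fun y hy => ?_, ?_⟩
      · obtain ⟨hy1, hy2⟩ := (PySem.Set.mem_discard _ _ _).mp hy
        have : y ∈ t := (PySem.Set.mem_ofList t y).mp hy1
        exact lt_of_le_of_ne (List.rel_of_pairwise_cons h this) (Ne.symm hy2)
      · have := ih h.of_cons
        rw [PySem.List.dedup_eq_ofList] at this
        show (List.filter _ _).Pairwise _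
        exact this.filter _

theorem pv_nums_perm (ps qs : List (String × Int)) (h : ps.Perm qs) (k : String) :
    (pvNums ps k).Perm (pvNums qs k) := by
  unfold pvNums
  exact (h.filter _).filterMap _

theorem pv_nums_pairwise (S : List (String × Int))
    (hpw : S.Pairwise (fun a b => (toLex a : Lex (String × Int)) ≤ toLex b)) (k : String) :
    (pvNums S k).Pairwise (· ≤ ·) := by
  unfold pvNums
  rw [List.pairwise_filterMap, List.pairwise_filter]
  refine List.Pairwise.imp ?_ hpw
  intro a b hab ha hb x hx y hy
  have ha' : a.1 = k := by simpa using ha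
  have hb' : b.1 = k := by simpa using hb
  have hxa : x = a.2 := by
    by_cases h0 : 0 ≤ a.2
    · rw [if_pos h0] at hx; exact (Option.some.inj hx).symm
    · rw [if_neg h0] at hx; cases hx
  have hyb : y = b.2 := by
    by_cases h0 : 0 ≤ b.2
    · rw [if_pos h0] at hy; exact (Option.some.inj hy).symm
    · rw [if_neg h0] at hy; cases hy
  subst hxa hyb
  rcases Prod.Lex.le_iff.mp hab with h | h
  · exact absurd h (by simp only [ofLex_toLex]; rw [ha', hb']; exact lt_irrefl k)
  · exact h.2

-- ===== VERDICT (by name: the statement is the Claim_ definition above) =====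
theorem compress_node_range_py_spec : Claim_equal_compress_node_range_py := by
  intro names _
  unfold Spec_compress_node_range_py compress_node_range_py compress_node_range_py_alt
  simp only []
  -- A side: the fold builds pvG of the parsed pairs
  rw [show (PySem.Dict.empty : PySem.Dict String (List Int)) = PySem.Dict.mk (pvG []) from rfl,
    pvA_fold]
  set P := (PySem.List.sorted names (fun x => x) false).map pvB_pair with hP
  have hitems : (PySem.Dict.mk (pvG ([] ++ P))).items
      = (PySem.List.dedup (P.map Prod.fst)).map (fun k => (k, pvNums P k)) := by
    show pvG ([] ++ P) = _
    rw [List.nil_append]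
    rfl
  rw [hitems, pv_sorted_map_fst (fun k => (k, pvNums P k)) (fun k => rfl), pv_foldA,
    List.map_map]
  -- B side: sorted pairs, then the run scan
  rw [pv_sorted2_eq_lex]
  set S := PySem.List.sorted (names.map pvB_pair)
      (fun p => (toLex p : Lex (String × Int))) false with hS
  rw [pv_scan_eq S (PySem.List.sorted_pairwise _ _)]
  have hperm : S.Perm P :=
    (PySem.List.sorted_perm (names.map pvB_pair) _ _).trans
      ((PySem.List.sorted_perm names (fun x => x) false).map pvB_pair).symm
  have hSfst : (S.map Prod.fst).Pairwise (· ≤ ·) := by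
    rw [List.pairwise_map]
    refine List.Pairwise.imp ?_ (PySem.List.sorted_pairwise (names.map pvB_pair)
      (fun p => (toLex p : Lex (String × Int))))
    intro a b hab
    rcases Prod.Lex.le_iff.mp hab with h | h
    · exact le_of_lt h
    · exact le_of_eq h.1
  have hkeys : PySem.List.sorted (PySem.List.dedup (P.map Prod.fst)) (fun x => x) false
      = PySem.List.dedup (S.map Prod.fst) := by
    apply PySem.List.sorted_id_eq_of_perm_of_pairwise
    · exact pv_dedup_perm _ _ (hperm.map Prod.fst)
    · exact (pv_dedup_pairwise_lt _ hSfst).imp (fun h => le_of_lt h)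
  rw [hkeys]
  refine congrArg (PySem.Str.join ",") (List.map_congr_left (fun k hk => ?_))
  show pvFmtA (k, pvNums P k) = pvFmt k (pvNums S k)
  rw [pv_fmtA_eq]
  congr 1
  apply PySem.List.sorted_id_eq_of_perm_of_pairwise
  · exact pv_nums_perm S P hperm k
  · exact pv_nums_pairwise S (PySem.List.sorted_pairwise _ _) k
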